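-- pv_equiv track=rewrite | github.com/pololee/oj-leetcode | companies/appf/find_record_solution.python3.py | first_by_key
-- ===== SOURCE A (Python) =====
-- def first_by_key(key, direction, records):
--     if not records:
--         return {}
--
--     cmp = RecordComparator(key, direction)
--     ans = records[0]
--     for record in records[1:]:
--         if cmp.compare(record, ans) < 0:
--             ans = record
--
--     return ans
--
-- class RecordComparator:
--     def __init__(self, key, direction):
--         self.key = key
--         self.direction = direction
--
--     def compare(self, a, b):
--         a_value = a.get(self.key, 0)
--         b_value = b.get(self.key, 0)
--
--         if a_value < b_value:
--             return -1 if self.direction == "asc" else 1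
--         elif a_value > b_value:
--             return 1 if self.direction == "asc" else -1
--         return 0
-- ===== SOURCE B (Python) =====
-- def first_by_key(key, direction, records):
--     if not records:
--         return {}
--     return sorted(records, key=lambda r: r.get(key, 0),
--                   reverse=(direction != "asc"))[0]
-- ===== Notes on version B (the rewrite author's own statement) =====
-- stated objective: simpler
-- what changed: Replaces the comparator class and the explicit best-so-far scan with one stable sort by the key (reverse for non-asc) and taking element [0], relying on sort stability for keep-first-among-ties.
import Mathlib
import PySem

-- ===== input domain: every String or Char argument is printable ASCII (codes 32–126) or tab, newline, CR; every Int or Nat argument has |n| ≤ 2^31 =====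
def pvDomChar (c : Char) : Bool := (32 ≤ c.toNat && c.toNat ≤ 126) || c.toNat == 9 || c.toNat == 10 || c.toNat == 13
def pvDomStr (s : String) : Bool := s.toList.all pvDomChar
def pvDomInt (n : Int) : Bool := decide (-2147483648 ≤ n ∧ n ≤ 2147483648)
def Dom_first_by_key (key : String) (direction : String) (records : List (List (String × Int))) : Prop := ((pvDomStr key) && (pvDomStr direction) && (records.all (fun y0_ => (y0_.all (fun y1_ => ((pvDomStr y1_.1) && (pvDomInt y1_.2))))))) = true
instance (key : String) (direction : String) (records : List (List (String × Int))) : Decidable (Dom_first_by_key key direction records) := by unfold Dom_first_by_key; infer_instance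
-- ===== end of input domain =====

-- B replaces A's comparator class + best-so-far scan with one stable (reverse-aware) sort by the key, taking element [0]; objective: simpler.

-- ===== PORT A =====
-- record.get(key, 0) on the assoc-list representation of a dict: first match, default 0
def recGetD (r : List (String × Int)) (key : String) : Int := (r.lookup key).getD 0

-- RecordComparator(key, direction).compare(a, b)
def recCompare (key : String) (direction : String) (a b : List (String × Int)) : Int :=
  let a_value := recGetD a key
  let b_value := recGetD b key
  if a_value < b_value then (if direction == "asc" then -1 else 1)
  else if a_value > b_value then (if direction == "asc" then 1 else -1)
  else 0

def first_by_key (key : String) (direction : String) (records : List (List (String × Int))) : List (String × Int) :=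
  if records = [] then []
  else
    let ans := PySem.List.pyGetD records 0 []
    (PySem.List.slice records (some 1) none).foldl
      (fun ans record => if recCompare key direction record ans < 0 then record else ans) ans

-- ===== PORT B =====
def first_by_key_alt (key : String) (direction : String) (records : List (List (String × Int))) : List (String × Int) :=
  if records = [] then []
  else (PySem.List.sorted records (fun r => recGetD r key) (direction != "asc")).headD []

-- ===== PRECONDITION & SPEC =====
def Spec_first_by_key (key : String) (direction : String) (records : List (List (String × Int))) (out : List (String × Int)) : Prop := out = first_by_key_alt key direction records
instance (key : String) (direction : String) (records : List (List (String × Int))) (out : List (String × Int)) : Decidable (Spec_first_by_key key direction records out) := by unfold Spec_first_by_key; infer_instance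

-- ===== CLAIM (what is proved, stated in full; the proofs are below) =====
def Claim_equal_first_by_key : Prop := ∀ (key : String) (direction : String) (records : List (List (String × Int))), Dom_first_by_key key direction records → Spec_first_by_key key direction records (first_by_key key direction records)

-- ===== LEMMAS AND PROOFS =====

theorem insertBy_nil {α : Type} (before : α → α → Bool) (y : α) :
    PySem.List.insertBy before y [] = [y] := by
  simp [PySem.List.insertBy]

theorem insertBy_cons {α : Type} (before : α → α → Bool) (y m : α) (t : List α) :
    PySem.List.insertBy before y (m :: t) =
      if before y m then y :: m :: t else m :: PySem.List.insertBy before y t := by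
  simp [PySem.List.insertBy]

-- head of a foldl of stable insertions into a nonempty accumulator = the best-so-far scan
theorem head_foldl_insertBy {α : Type} (before : α → α → Bool) (d : α) :
    ∀ (xs : List α) (m : α) (t : List α),
      (xs.foldl (fun acc y => PySem.List.insertBy before y acc) (m :: t)).headD d
        = xs.foldl (fun ans r => if before r ans then r else ans) m := by
  intro xs
  induction xs with
  | nil => intro m t; rfl
  | cons y ys ih =>
    intro m t
    simp only [List.foldl_cons, insertBy_cons]
    by_cases h : before y m = true
    · simp only [h, if_true, ih]
    · simp only [h, if_false, Bool.false_eq_true, ih]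

theorem recCompare_lt_asc (key : String) (r s : List (String × Int)) :
    (recCompare key "asc" r s < 0) ↔ recGetD r key < recGetD s key := by
  simp only [recCompare]
  split_ifs with h1 h2 <;> simp_all

theorem recCompare_lt_nonasc (key direction : String) (hd : (direction == "asc") = false)
    (r s : List (String × Int)) :
    (recCompare key direction r s < 0) ↔ recGetD s key < recGetD r key := by
  simp only [recCompare, hd]
  split_ifs with h1 h2 <;> simp_all <;> omega

-- ===== VERDICT (by name: the statement is the Claim_ definition above) =====
theorem first_by_key_spec : Claim_equal_first_by_key := by
  intro key direction records _
  unfold Spec_first_by_key first_by_key first_by_key_alt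
  cases records with
  | nil => rfl
  | cons x xs =>
    simp only [reduceCtorEq, if_false, PySem.List.pyGetD_zero_cons, PySem.List.slice_from_one,
      List.tail_cons]
    by_cases hd : (direction == "asc") = true
    · have hdir : direction = "asc" := by simpa using hd
      subst hdir
      simp only [bne_self_eq_false, PySem.List.sorted_eq_foldl_insertBy,
        List.foldl_cons, insertBy_nil,
        head_foldl_insertBy (fun a b => decide (recGetD a key < recGetD b key)) [] xs x []]
      apply PySem.List.foldl_congr_mem
      intro ans r _
      by_cases h : recGetD r key < recGetD ans key
      · rw [if_pos ((recCompare_lt_asc key r ans).mpr h)]; simp [h]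
      · rw [if_neg (fun hlt => h ((recCompare_lt_asc key r ans).mp hlt))]; simp [h]
    · have hd' : (direction == "asc") = false := by simpa using hd
      have hrev : (direction != "asc") = true := by simp [bne, hd']
      simp only [hrev, PySem.List.sorted_rev_eq_foldl_insertBy,
        List.foldl_cons, insertBy_nil,
        head_foldl_insertBy (fun a b => decide (recGetD b key < recGetD a key)) [] xs x []]
      apply PySem.List.foldl_congr_mem
      intro ans r _
      by_cases h : recGetD ans key < recGetD r key
      · rw [if_pos ((recCompare_lt_nonasc key direction hd' r ans).mpr h)]; simp [h]
      · rw [if_neg (fun hlt => h ((recCompare_lt_nonasc key direction hd' r ans).mp hlt))]; simp [h]
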